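-- pv_equiv track=rewrite | github.com/Debadrita20/Network_LabAssignments | Assignment3/errordetect.py | detect_error_lrc
-- ===== SOURCE A (Python) =====
-- def detect_error_lrc(codeword,parity='odd'):   # returns True if error is detected, otherwise False
--     n=[0,0,0,0]
--     i=0
--     for ch in codeword:
--         if ch=='1':
--             n[i%4]=n[i%4]+1
--         i=i+1
--     if parity=='odd':
--         for x in n:
--             if x%2==0:
--                 return True
--         return False
--     else:
--         for x in n:
--             if x%2==1:
--                 return True
--         return False
-- ===== SOURCE B (Python) =====
-- def detect_error_lrc(codeword, parity='odd'):
--     counts = [codeword[j::4].count('1') for j in range(4)]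
--     if parity == 'odd':
--         return any(c % 2 == 0 for c in counts)
--     return any(c % 2 == 1 for c in counts)
-- ===== Notes on version B (the rewrite author's own statement) =====
-- stated objective: faster
-- what changed: A's single row-major pass that fans each character out into a 4-slot counter array is replaced by four column-major strided-slice counts combined with any() parity tests; the per-character Python loop disappears into C-level slice/count calls.
import Mathlib
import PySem

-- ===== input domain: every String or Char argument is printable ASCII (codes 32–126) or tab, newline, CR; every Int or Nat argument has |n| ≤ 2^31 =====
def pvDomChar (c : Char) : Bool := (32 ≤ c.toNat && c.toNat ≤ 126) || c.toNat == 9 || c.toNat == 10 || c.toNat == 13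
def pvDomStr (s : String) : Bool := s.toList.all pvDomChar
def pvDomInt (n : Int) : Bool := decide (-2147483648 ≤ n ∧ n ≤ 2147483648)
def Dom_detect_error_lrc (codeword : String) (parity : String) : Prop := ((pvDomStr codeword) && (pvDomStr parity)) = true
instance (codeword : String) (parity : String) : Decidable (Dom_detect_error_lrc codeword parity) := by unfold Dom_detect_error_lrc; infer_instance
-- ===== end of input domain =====

-- B replaces A's per-character row-major counting pass by four column-major strided-slice counts (constant-factor speedup measured).

-- ===== PORT A =====
-- the `for ch in codeword` loop: i (always ≥ 0 in A, kept as Nat) indexes the 4-slot counter list n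
def lrcLoop : List Char → List Int → Nat → List Int
  | [], n, _ => n
  | ch :: rest, n, i =>
      lrcLoop rest (if ch = '1' then n.set (i % 4) (n.getD (i % 4) 0 + 1) else n) (i + 1)

def detect_error_lrc (codeword : String) (parity : String) : Bool :=
  let n := lrcLoop codeword.toList [0, 0, 0, 0] 0
  if parity = "odd" then
    -- `for x in n: if x%2==0: return True` then `return False`
    n.any (fun x => PySem.Int.mod x 2 == 0)
  else
    n.any (fun x => PySem.Int.mod x 2 == 1)

-- ===== PORT B =====
def detect_error_lrc_alt (codeword : String) (parity : String) : Bool :=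
  let counts : List Int := (PySem.List.pyRange 0 4 1).map
    (fun j => (((PySem.List.slice? codeword.toList (some j) none 4).getD []).count '1' : Int))
  if parity = "odd" then
    counts.any (fun c => PySem.Int.mod c 2 == 0)
  else
    counts.any (fun c => PySem.Int.mod c 2 == 1)

-- ===== PRECONDITION & SPEC =====
def Spec_detect_error_lrc (codeword : String) (parity : String) (out : Bool) : Prop := out = detect_error_lrc_alt codeword parity
instance (codeword : String) (parity : String) (out : Bool) : Decidable (Spec_detect_error_lrc codeword parity out) := by unfold Spec_detect_error_lrc; infer_instance

-- ===== CLAIM (what is proved, stated in full; the proofs are below) =====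
def Claim_equal_detect_error_lrc : Prop := ∀ (codeword : String) (parity : String), Dom_detect_error_lrc codeword parity → Spec_detect_error_lrc codeword parity (detect_error_lrc codeword parity)

-- ===== LEMMAS AND PROOFS =====

-- number of '1'-characters at positions p with (m + p) % 4 = j
def pvG : List Char → Nat → Nat → Int
  | [], _, _ => 0
  | ch :: rest, m, j => (if ch = '1' ∧ m = j then 1 else 0) + pvG rest ((m + 1) % 4) j

-- every 4th element starting at offset j
def pvStrided : List Char → Nat → List Char
  | [], _ => []
  | x :: xs, 0 => x :: pvStrided xs 3
  | _ :: xs, j + 1 => pvStrided xs j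

theorem lrcLoop_eq_pvG (cs : List Char) : ∀ (a b c d : Int) (i : Nat),
    lrcLoop cs [a, b, c, d] i =
      [a + pvG cs (i % 4) 0, b + pvG cs (i % 4) 1, c + pvG cs (i % 4) 2, d + pvG cs (i % 4) 3] := by
  induction cs with
  | nil => intro a b c d i; simp [lrcLoop, pvG]
  | cons ch rest ih =>
    intro a b c d i
    have h4 : i % 4 = 0 ∨ i % 4 = 1 ∨ i % 4 = 2 ∨ i % 4 = 3 := by omega
    have hsucc : (i + 1) % 4 = (i % 4 + 1) % 4 := by omega
    by_cases hch : ch = '1' <;>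
      rcases h4 with h | h | h | h <;>
      simp [lrcLoop, pvG, hch, h, ih, hsucc, List.set] <;> omega

theorem strided_count_eq_pvG (cs : List Char) : ∀ (m j : Nat), m < 4 → j < 4 →
    ((pvStrided cs j).count '1' : Int) = pvG cs m ((m + j) % 4) := by
  induction cs with
  | nil => intro m j _ _; simp [pvStrided, pvG]
  | cons ch rest ih =>
    intro m j hm hj
    match j with
    | 0 =>
      have hmm : m % 4 = m := by omega
      have h3 : ((m + 1) % 4 + 3) % 4 = m := by omega
      have := ih ((m + 1) % 4) 3 (by omega) (by omega)
      rw [h3] at this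
      by_cases hch : ch = '1' <;>
        simp [pvStrided, pvG, hmm, hch, this] <;> omega
    | jj + 1 =>
      have hne : ¬ (m = (m + (jj + 1)) % 4) := by omega
      have hrot : ((m + 1) % 4 + jj) % 4 = (m + (jj + 1)) % 4 := by omega
      have := ih ((m + 1) % 4) jj (by omega) (by omega)
      rw [hrot] at this
      simp [pvStrided, pvG, hne, this]

theorem pvSliceClean (cs : List Char) (j : Nat) :
    PySem.List.slice? cs (some (j : Int)) none 4 =
      some (List.filterMap (fun k => cs[min j cs.length + 4 * k]?)
        (List.range ((cs.length - min j cs.length + 3) / 4))) := by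
  simp only [PySem.List.slice?, PySem.List.sliceIndices,
    show ¬((4:Int) = 0) by norm_num, show ¬((4:Int) < 0) by norm_num,
    show ¬((j:Int) < 0) by omega, show (0:Int) < 4 by norm_num,
    if_false, if_true, reduceIte]
  have hC : (if min (↑j) (↑cs.length) < (cs.length : Int) then
      (((cs.length : Int) - min ↑j ↑cs.length + 4 - 1) / 4).toNat else 0) =
      (cs.length - min j cs.length + 3) / 4 := by
    split_ifs with h <;> omega
  rw [hC]
  congr 1
  apply List.filterMap_congr
  intro k hk
  congr 1
  omega

theorem slice?_eq_strided (cs : List Char) : ∀ (j : Nat), j < 4 →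
    PySem.List.slice? cs (some (j : Int)) none 4 = some (pvStrided cs j) := by
  induction cs with
  | nil => intro j hj; simp [pvSliceClean, pvStrided]
  | cons ch rest ih =>
    intro j hj
    rw [pvSliceClean]
    match j with
    | 0 =>
      have h3 := ih 3 (by omega)
      rw [pvSliceClean] at h3
      have h3' : pvStrided rest 3 =
          List.filterMap (fun k => rest[min 3 rest.length + 4 * k]?)
            (List.range ((rest.length - min 3 rest.length + 3) / 4)) :=
        (Option.some_inj.mp h3).symm
      have hc : ((ch :: rest).length - min 0 (ch :: rest).length + 3) / 4
          = rest.length / 4 + 1 := by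
        simp [List.length_cons]; omega
      rw [hc, List.range_succ_eq_map, List.filterMap_cons, List.filterMap_map]
      have hd : (rest.length - min 3 rest.length + 3) / 4 = rest.length / 4 := by omega
      simp only [pvStrided, h3', hd, Nat.zero_min, Nat.zero_add, Nat.mul_zero,
        List.getElem?_cons_zero]
      congr 2
      apply List.filterMap_congr
      intro k hk
      have hk4 : k < rest.length / 4 := List.mem_range.mp hk
      have hmin3 : min 3 rest.length = 3 := by omega
      have hidx : 4 * Nat.succ k = (min 3 rest.length + 4 * k) + 1 := by omega
      simp only [Function.comp_apply, hidx, List.getElem?_cons_succ]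
    | jj + 1 =>
      have hih := ih jj (by omega)
      rw [pvSliceClean] at hih
      have hmin : min (jj + 1) (ch :: rest).length = min jj rest.length + 1 := by
        simp [List.length_cons]
      have hcnt : ((ch :: rest).length - (min jj rest.length + 1) + 3) / 4
          = (rest.length - min jj rest.length + 3) / 4 := by
        simp [List.length_cons]
      rw [hmin, hcnt]
      show some _ = some (pvStrided rest jj)
      rw [← hih]
      congr 1
      apply List.filterMap_congr
      intro k hk
      have hidx : min jj rest.length + 1 + 4 * k = (min jj rest.length + 4 * k) + 1 := by omega
      rw [hidx, List.getElem?_cons_succ]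

theorem count_strided_eq (cs : List Char) (j : Nat) (hj : j < 4) :
    (((PySem.List.slice? cs (some (j : Int)) none 4).getD []).count '1' : Int) = pvG cs 0 j := by
  rw [slice?_eq_strided cs j hj]
  have h := strided_count_eq_pvG cs 0 j (by omega) hj
  simpa [Nat.mod_eq_of_lt hj] using h

theorem detect_error_lrc_spec : Claim_equal_detect_error_lrc := by
  intro codeword parity _
  show detect_error_lrc codeword parity = detect_error_lrc_alt codeword parity
  have hr : PySem.List.pyRange 0 4 1 = [0, 1, 2, 3] := by decide
  have e0 := count_strided_eq codeword.toList 0 (by omega)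
  have e1 := count_strided_eq codeword.toList 1 (by omega)
  have e2 := count_strided_eq codeword.toList 2 (by omega)
  have e3 := count_strided_eq codeword.toList 3 (by omega)
  have hA := lrcLoop_eq_pvG codeword.toList 0 0 0 0 0
  simp only [detect_error_lrc, detect_error_lrc_alt, hr, List.map_cons, List.map_nil, hA,
    Nat.zero_mod, zero_add]
  simp only [Nat.cast_ofNat, Nat.cast_zero, Nat.cast_one] at e0 e1 e2 e3
  rw [e0, e1, e2, e3]
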